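-- pv_equiv track=rewrite | github.com/mshafqats/HackerEarth | Data Structure/Arrays/1-D/Pairs Having Similar Elements.py | SimilarElementsPairs
-- ===== SOURCE A (Python) =====
-- def SimilarElementsPairs (A,N):
--     sorted_list = sorted(A)
--     similar = False
--     ans = 0
--     count = 0
--     prev = sorted_list[0]
--     for elem in sorted_list:
--         if elem == prev:
--             count += 1
--         elif prev+1 == elem:
--             count += 1
--             similar = True
--         else:
--             if similar:
--                 ans += (count * (count-1)) // 2
--                 similar = False
--             count = 1
--         prev = elem
--     if similar:
--                 ans += (count * (count-1)) // 2
--     return ans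
-- ===== SOURCE B (Python) =====
-- def SimilarElementsPairs(A, N):
--     counts = {}
--     for x in A:
--         counts[x] = counts.get(x, 0) + 1
--     keys = sorted(counts)
--     prev = keys[0]
--     run = counts[prev]
--     has_consec = False
--     total = 0
--     for k in keys[1:]:
--         if k == prev + 1:
--             run += counts[k]
--             has_consec = True
--         else:
--             if has_consec:
--                 total += run * (run - 1) // 2
--             run = counts[k]
--             has_consec = False
--         prev = k
--     if has_consec:
--         total += run * (run - 1) // 2
--     return total
-- ===== Notes on version B (the rewrite author's own statement) =====
-- stated objective: alternative
-- what changed: B builds a frequency dict in one pass and then runs the run/merge state machine over the sorted DISTINCT keys (summing stored frequencies per key), instead of A's element-by-element scan of the fully sorted list; keys[0] preserves A's IndexError on empty input.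
import Mathlib
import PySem

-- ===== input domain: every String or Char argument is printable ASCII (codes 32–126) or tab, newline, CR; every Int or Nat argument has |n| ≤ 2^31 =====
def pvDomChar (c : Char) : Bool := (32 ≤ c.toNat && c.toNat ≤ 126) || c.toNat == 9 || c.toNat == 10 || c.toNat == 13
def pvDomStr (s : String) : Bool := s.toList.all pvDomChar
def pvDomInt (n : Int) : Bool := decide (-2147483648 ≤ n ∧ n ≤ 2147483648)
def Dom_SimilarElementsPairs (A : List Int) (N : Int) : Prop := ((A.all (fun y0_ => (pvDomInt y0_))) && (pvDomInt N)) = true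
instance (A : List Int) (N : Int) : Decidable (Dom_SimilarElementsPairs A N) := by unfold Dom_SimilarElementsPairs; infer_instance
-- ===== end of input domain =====

-- B counts frequencies into a dict and runs the run/merge state machine over the sorted distinct keys (summing stored counts), instead of A's element-wise scan of the whole sorted list; same return value on every nonempty input.


-- ===== PORT A =====
-- A's loop body: state = (similar, ans, count, prev)
def pvAStep (st : Bool × Int × Int × Int) (elem : Int) : Bool × Int × Int × Int :=
  match st with
  | (similar, ans, count, prev) =>
    if elem = prev then (similar, ans, count + 1, elem)
    else if prev + 1 = elem then (true, ans, count + 1, elem)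
    else if similar then (false, ans + PySem.Int.floordiv (count * (count - 1)) 2, 1, elem)
    else (false, ans, 1, elem)

def SimilarElementsPairs (A : List Int) (N : Int) : Int :=
  match PySem.List.sorted A (fun x => x) false with
  | [] => 0  -- Python raises IndexError on sorted_list[0]; excluded by Pre_
  | p0 :: rest =>
    let st := (p0 :: rest).foldl pvAStep (false, 0, 0, p0)
    if st.1 then st.2.1 + PySem.Int.floordiv (st.2.2.1 * (st.2.2.1 - 1)) 2 else st.2.1

-- ===== PORT B =====
-- B's loop body over distinct keys: state = (run, has_consec, total, prev)
def pvBStep (counts : PySem.Dict Int Int) (st : Int × Bool × Int × Int) (k : Int) : Int × Bool × Int × Int :=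
  match st with
  | (run, has_consec, total, prev) =>
    if k = prev + 1 then (run + counts.getD k 0, true, total, k)
    else if has_consec then (counts.getD k 0, false, total + PySem.Int.floordiv (run * (run - 1)) 2, k)
    else (counts.getD k 0, false, total, k)

def SimilarElementsPairs_alt (A : List Int) (N : Int) : Int :=
  let counts := A.foldl (fun d x => d.insert x (d.getD x 0 + 1)) PySem.Dict.empty
  match PySem.List.sorted counts.keys (fun x => x) false with
  | [] => 0  -- Python raises IndexError on keys[0]; excluded by Pre_
  | k0 :: rest =>
    let st := rest.foldl (pvBStep counts) (counts.getD k0 0, false, 0, k0)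
    if st.2.1 then st.2.2.1 + PySem.Int.floordiv (st.1 * (st.1 - 1)) 2 else st.2.2.1

-- ===== PRECONDITION & SPEC =====
-- Python A raises IndexError (sorted_list[0]) on the empty list; Pre_ excludes exactly that input.
def Pre_SimilarElementsPairs (A : List Int) (N : Int) : Prop := A ≠ []
instance (A : List Int) (N : Int) : Decidable (Pre_SimilarElementsPairs A N) := by unfold Pre_SimilarElementsPairs; infer_instance
def pvWitness_SimilarElementsPairs : List Int × Int := ([1, 2, 2, 5], 4)

def Spec_SimilarElementsPairs (A : List Int) (N : Int) (out : Int) : Prop := out = SimilarElementsPairs_alt A N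
instance (A : List Int) (N : Int) (out : Int) : Decidable (Spec_SimilarElementsPairs A N out) := by unfold Spec_SimilarElementsPairs; infer_instance

-- ===== CLAIM (what is proved, stated in full; the proofs are below) =====
def Claim_equal_SimilarElementsPairs : Prop := ∀ (A : List Int) (N : Int), Dom_SimilarElementsPairs A N → Pre_SimilarElementsPairs A N → Spec_SimilarElementsPairs A N (SimilarElementsPairs A N)

-- ===== LEMMAS AND PROOFS =====

-- finishing step of A (applied after its fold)
def pvFinA (st : Bool × Int × Int × Int) : Int :=
  if st.1 then st.2.1 + PySem.Int.floordiv (st.2.2.1 * (st.2.2.1 - 1)) 2 else st.2.1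

-- finishing step of B
def pvFinB (st : Int × Bool × Int × Int) : Int :=
  if st.2.1 then st.2.2.1 + PySem.Int.floordiv (st.1 * (st.1 - 1)) 2 else st.2.2.1

lemma pvAStep_replicate (n : Nat) (sim : Bool) (ans cnt k : Int) :
    (List.replicate n k).foldl pvAStep (sim, ans, cnt, k) = (sim, ans, cnt + (n : Int), k) := by
  induction n generalizing cnt with
  | zero => simp
  | succ m ih =>
    rw [List.replicate_succ, List.foldl_cons]
    have : pvAStep (sim, ans, cnt, k) k = (sim, ans, cnt + 1, k) := by
      simp [pvAStep]
    rw [this, ih]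
    have h2 : cnt + 1 + (m : Int) = cnt + ((m + 1 : Nat) : Int) := by push_cast; ring
    rw [h2]

lemma pvMain (counts : PySem.Dict Int Int) (ks : List Int) (c : Int → Nat)
    (hpos : ∀ k ∈ ks, 1 ≤ c k) (hc : ∀ k ∈ ks, counts.getD k 0 = (c k : Int)) :
    ∀ (prev : Int), (prev :: ks).Pairwise (· < ·) → ∀ (has : Bool) (total run : Int),
    pvFinA ((ks.flatMap (fun k => List.replicate (c k) k)).foldl pvAStep (has, total, run, prev))
      = pvFinB (ks.foldl (pvBStep counts) (run, has, total, prev)) := by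
  induction ks with
  | nil =>
    intro prev _ has total run
    simp [pvFinA, pvFinB]
  | cons k ks ih =>
    intro prev hpw has total run
    have hprev : prev < k := (List.pairwise_cons.mp hpw).1 k (by simp)
    obtain ⟨m, hm⟩ : ∃ m, c k = m + 1 := ⟨c k - 1, by have := hpos k (by simp); omega⟩
    have hrep : List.replicate (c k) k = k :: List.replicate m k := by
      rw [hm, List.replicate_succ]
    rw [List.flatMap_cons, hrep, List.foldl_append, List.foldl_cons]
    have hk1 : ¬ (k = prev) := by omega
    have hpw' : (k :: ks).Pairwise (· < ·) := (List.pairwise_cons.mp hpw).2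
    have hpos' : ∀ x ∈ ks, 1 ≤ c x := fun x hx => hpos x (by simp [hx])
    have hc' : ∀ x ∈ ks, counts.getD x 0 = (c x : Int) := fun x hx => hc x (by simp [hx])
    have hck : counts.getD k 0 = (c k : Int) := hc k (by simp)
    by_cases h2 : prev + 1 = k
    · have hA : pvAStep (has, total, run, prev) k = (true, total, run + 1, k) := by
        simp [pvAStep, hk1, h2]
      rw [hA, pvAStep_replicate, List.foldl_cons]
      have hB : pvBStep counts (run, has, total, prev) k
          = (run + (c k : Int), true, total, k) := by
        simp only [pvBStep]
        rw [if_pos h2.symm, hck]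
      rw [hB]
      have harg : run + 1 + (m : Int) = run + (c k : Int) := by
        rw [hm]; push_cast; ring
      rw [harg]
      exact ih hpos' hc' k hpw' true total (run + (c k : Int))
    · have h2' : ¬ (k = prev + 1) := fun h => h2 h.symm
      rw [List.foldl_cons]
      cases has with
      | false =>
        have hA : pvAStep (false, total, run, prev) k = (false, total, 1, k) := by
          simp [pvAStep, hk1, h2]
        have hB : pvBStep counts (run, false, total, prev) k
            = ((c k : Int), false, total, k) := by
          simp [pvBStep, h2', hck]
        rw [hA, pvAStep_replicate, hB]
        have harg : (1 : Int) + (m : Int) = (c k : Int) := by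
          rw [hm]; push_cast; ring
        rw [harg]
        exact ih hpos' hc' k hpw' false total ((c k : Int))
      | true =>
        have hA : pvAStep (true, total, run, prev) k
            = (false, total + PySem.Int.floordiv (run * (run - 1)) 2, 1, k) := by
          simp [pvAStep, hk1, h2]
        have hB : pvBStep counts (run, true, total, prev) k
            = ((c k : Int), false, total + PySem.Int.floordiv (run * (run - 1)) 2, k) := by
          simp [pvBStep, h2', hck]
        rw [hA, pvAStep_replicate, hB]
        have harg : (1 : Int) + (m : Int) = (c k : Int) := by
          rw [hm]; push_cast; ring
        rw [harg]
        exact ih hpos' hc' k hpw' false (total + PySem.Int.floordiv (run * (run - 1)) 2) ((c k : Int))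

-- the sorted list is the sorted distinct keys expanded by multiplicity
lemma pvCountFlat (ks : List Int) (c : Int → Nat) (hnd : ks.Nodup) (a : Int) :
    (ks.flatMap (fun k => List.replicate (c k) k)).count a = if a ∈ ks then c a else 0 := by
  induction ks with
  | nil => simp
  | cons k ks ih =>
    have hnd' := (List.nodup_cons.mp hnd).2
    have hk : k ∉ ks := (List.nodup_cons.mp hnd).1
    rw [List.flatMap_cons, List.count_append, ih hnd']
    by_cases hak : a = k
    · subst hak
      simp [hk]
    · simp [List.count_replicate, hak, Ne.symm hak]

lemma pvFlatPairwise (ks : List Int) (c : Int → Nat) (hlt : ks.Pairwise (· < ·)) :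
    (ks.flatMap (fun k => List.replicate (c k) k)).Pairwise (· ≤ ·) := by
  induction ks with
  | nil => simp
  | cons k ks ih =>
    rw [List.flatMap_cons, List.pairwise_append]
    refine ⟨?_, ih (List.pairwise_cons.mp hlt).2, ?_⟩
    · rw [List.pairwise_replicate]
      right; exact le_rfl
    · intro x hx y hy
      rw [List.mem_replicate] at hx
      rw [List.mem_flatMap] at hy
      obtain ⟨k', hk', hy'⟩ := hy
      rw [List.mem_replicate] at hy'
      have := (List.pairwise_cons.mp hlt).1 k' hk'
      omega

lemma pvExpand (A : List Int) :
    PySem.List.sorted A (fun x => x) false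
      = (PySem.List.sorted (PySem.Set.ofList A) (fun x => x) false).flatMap
          (fun k => List.replicate (A.count k) k) := by
  set ks := PySem.List.sorted (PySem.Set.ofList A) (fun x => x) false with hks
  have hnd : ks.Nodup := (PySem.List.sorted_perm _ _ _).symm.nodup (PySem.Set.nodup_ofList A)
  have hmem : ∀ a : Int, a ∈ ks ↔ a ∈ A := by
    intro a
    rw [hks, PySem.List.mem_sorted, PySem.Set.mem_ofList]
  have hperm : (ks.flatMap (fun k => List.replicate (A.count k) k)).Perm A := by
    rw [List.perm_iff_count]
    intro a
    rw [pvCountFlat ks _ hnd a]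
    by_cases ha : a ∈ ks
    · simp [ha]
    · have : a ∉ A := fun h => ha ((hmem a).mpr h)
      simp [ha, List.count_eq_zero_of_not_mem this]
  have hlt : ks.Pairwise (· < ·) := by
    rw [hks]; exact PySem.List.sorted_ofList_pairwise_lt A
  have hpw : (ks.flatMap (fun k => List.replicate (A.count k) k)).Pairwise (· ≤ ·) :=
    pvFlatPairwise ks _ hlt
  exact PySem.List.sorted_id_eq_of_perm_of_pairwise _ _ hperm hpw

-- ===== VERDICT (by name: the statement is the Claim_ definition above) =====
theorem SimilarElementsPairs_spec : Claim_equal_SimilarElementsPairs := by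
  intro A N _ hpre
  unfold Spec_SimilarElementsPairs SimilarElementsPairs SimilarElementsPairs_alt
  rw [show (A.foldl (fun d x => d.insert x (d.getD x 0 + 1)) PySem.Dict.empty)
        = PySem.Dict.counter A from PySem.Dict.foldl_insert_getD_add_one_eq_counter A]
  dsimp only
  rw [PySem.Dict.keys_counter]
  have hmem : ∀ a : Int, a ∈ PySem.List.sorted (PySem.Set.ofList A) (fun x => x) false ↔ a ∈ A := by
    intro a; rw [PySem.List.mem_sorted, PySem.Set.mem_ofList]
  cases hk : PySem.List.sorted (PySem.Set.ofList A) (fun x => x) false with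
  | nil =>
    exfalso
    have h0 : PySem.Set.ofList A = [] := (PySem.List.sorted_eq_nil_iff _ _ _).mp hk
    cases A with
    | nil => exact hpre rfl
    | cons a A' =>
      have ha : a ∈ PySem.Set.ofList (a :: A') := (PySem.Set.mem_ofList _ _).mpr (by simp)
      rw [h0] at ha
      simp at ha
  | cons k0 rest =>
    have hlt : (k0 :: rest).Pairwise (· < ·) := by
      rw [← hk]; exact PySem.List.sorted_ofList_pairwise_lt A
    have hmem' : ∀ a : Int, a ∈ k0 :: rest ↔ a ∈ A := by
      intro a; rw [← hk]; exact hmem a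
    have hexp := pvExpand A
    rw [hk] at hexp
    have hk0 : 1 ≤ A.count k0 := List.count_pos_iff.mpr ((hmem' k0).mp (by simp))
    have hrep : List.replicate (A.count k0) k0 = k0 :: List.replicate (A.count k0 - 1) k0 := by
      conv_lhs => rw [show A.count k0 = (A.count k0 - 1) + 1 by omega]
      rw [List.replicate_succ]
    rw [hexp, List.flatMap_cons, hrep, List.cons_append]
    dsimp only
    rw [List.foldl_cons]
    have hstep0 : pvAStep (false, 0, 0, k0) k0 = (false, 0, 1, k0) := by simp [pvAStep]
    rw [hstep0, List.foldl_append, pvAStep_replicate]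
    have hc : ∀ x ∈ rest, (PySem.Dict.counter A).getD x 0 = ((A.count x : Nat) : Int) := by
      intro x _; exact PySem.Dict.getD_counter A x
    have hpos : ∀ x ∈ rest, 1 ≤ A.count x := by
      intro x hx; exact List.count_pos_iff.mpr ((hmem' x).mp (by simp [hx]))
    have hB0 : (PySem.Dict.counter A).getD k0 0 = ((A.count k0 : Nat) : Int) :=
      PySem.Dict.getD_counter A k0
    rw [hB0]
    have h1 : (1 : Int) + ((A.count k0 - 1 : Nat) : Int) = ((A.count k0 : Nat) : Int) := by
      push_cast [hk0]; omega
    rw [h1]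
    exact pvMain (PySem.Dict.counter A) rest (fun x => A.count x) hpos hc k0 hlt false 0
      ((A.count k0 : Nat) : Int)
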